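-- pv_equiv track=rewrite | github.com/strongca22-cpu/utility-api | src/utility_api/ingest/ca_ewrims.py | _build_use_code_lookup
-- ===== SOURCE A (Python) =====
-- EXCLUDE_USE_CODES = {"Domestic"}
--
-- def _build_use_code_lookup(
--     uses_records: list[dict],
-- ) -> dict[str, list[str]]:
--     """Build APPLICATION_NUMBER → list of USE_CODEs mapping.
--
--     Excludes USE_CODEs in EXCLUDE_USE_CODES.
--
--     Parameters
--     ----------
--     uses_records : list[dict]
--         Records from the Uses and Seasons resource.
--
--     Returns
--     -------
--     dict[str, list[str]]
--         APPLICATION_NUMBER → deduplicated list of USE_CODEs.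
--     """
--     lookup: dict[str, set[str]] = {}
--     for rec in uses_records:
--         app_num = rec.get("APPLICATION_NUMBER", "")
--         use_code = rec.get("USE_CODE", "")
--         if not app_num or not use_code:
--             continue
--         if use_code in EXCLUDE_USE_CODES:
--             continue
--         lookup.setdefault(app_num, set()).add(use_code)
--
--     # Convert sets to sorted lists
--     return {k: sorted(v) for k, v in lookup.items()}
-- ===== SOURCE B (Python) =====
-- EXCLUDE_USE_CODES = {"Domestic"}
--
--
-- def _build_use_code_lookup(uses_records):
--     """Flat-pairs re-implementation: extract filtered (app, code) pairs once,
--     then build each entry from the pair list."""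
--     pairs = [
--         (a, c)
--         for a, c in (
--             (r.get("APPLICATION_NUMBER", ""), r.get("USE_CODE", ""))
--             for r in uses_records
--         )
--         if a and c and c not in EXCLUDE_USE_CODES
--     ]
--     return {
--         a: sorted({c for x, c in pairs if x == a})
--         for a in dict.fromkeys(a for a, _ in pairs)
--     }
-- ===== Notes on version B (the rewrite author's own statement) =====
-- stated objective: alternative
-- what changed: Replaces the incremental dict-of-sets accumulation with a two-phase pipeline: one comprehension extracts the filtered (app, code) pairs, then a dict comprehension over the first-occurrence-deduped keys builds each sorted unique code list directly from the pair list.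
import Mathlib
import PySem

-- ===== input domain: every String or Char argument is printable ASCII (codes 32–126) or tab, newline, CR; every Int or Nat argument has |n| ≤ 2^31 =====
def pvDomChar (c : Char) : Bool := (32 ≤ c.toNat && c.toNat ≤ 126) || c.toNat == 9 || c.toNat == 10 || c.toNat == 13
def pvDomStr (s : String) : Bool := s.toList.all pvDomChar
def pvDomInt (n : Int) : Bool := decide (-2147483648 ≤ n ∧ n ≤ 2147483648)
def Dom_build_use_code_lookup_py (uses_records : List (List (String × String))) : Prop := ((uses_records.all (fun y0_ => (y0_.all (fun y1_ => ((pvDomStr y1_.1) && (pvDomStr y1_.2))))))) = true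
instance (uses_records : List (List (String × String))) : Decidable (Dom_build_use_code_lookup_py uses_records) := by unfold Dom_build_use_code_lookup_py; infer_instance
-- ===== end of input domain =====

-- B is an alternative two-phase pipeline (flat filtered pair list, then a comprehension
-- over the deduped keys) with the same return value; neither version mutates its argument.

-- EXCLUDE_USE_CODES = {"Domestic"}
def pvExcludeUseCodes : PySem.Set String := PySem.Set.ofList ["Domestic"]

-- ===== PORT A =====
def build_use_code_lookup_py (uses_records : List (List (String × String))) : List (String × List String) :=
  -- lookup: dict[str, set[str]] = {}; for rec in uses_records: …
  let lookup : PySem.Dict String (PySem.Set String) :=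
    uses_records.foldl (fun d rec =>
      let app_num := (PySem.Dict.mk rec).getD "APPLICATION_NUMBER" ""
      let use_code := (PySem.Dict.mk rec).getD "USE_CODE" ""
      if app_num == "" || use_code == "" then d
      else if PySem.Set.contains pvExcludeUseCodes use_code then d
      else d.modify app_num PySem.Set.empty (fun s => PySem.Set.add s use_code))  -- setdefault(..., set()).add(...)
      PySem.Dict.empty
  -- {k: sorted(v) for k, v in lookup.items()}
  lookup.items.map (fun p => (p.1, PySem.List.sorted p.2 (fun x => x) false))

-- ===== PORT B =====
-- the filtered (app, code) pair list of Source B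
def pvPairs (uses_records : List (List (String × String))) : List (String × String) :=
  (uses_records.map (fun r =>
      ((PySem.Dict.mk r).getD "APPLICATION_NUMBER" "", (PySem.Dict.mk r).getD "USE_CODE" ""))).filter
    (fun p => !(p.1 == "") && !(p.2 == "") && !(PySem.Set.contains pvExcludeUseCodes p.2))

def build_use_code_lookup_py_alt (uses_records : List (List (String × String))) : List (String × List String) :=
  let pairs := pvPairs uses_records
  (PySem.List.dedup (pairs.map (fun p => p.1))).map (fun a =>
    (a, PySem.List.sorted
          (PySem.Set.ofList ((pairs.filter (fun p => p.1 == a)).map (fun p => p.2)))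
          (fun x => x) false))

-- ===== PRECONDITION & SPEC =====
def Spec_build_use_code_lookup_py (uses_records : List (List (String × String))) (out : List (String × List String)) : Prop := out = build_use_code_lookup_py_alt uses_records
instance (uses_records : List (List (String × String))) (out : List (String × List String)) : Decidable (Spec_build_use_code_lookup_py uses_records out) := by unfold Spec_build_use_code_lookup_py; infer_instance

-- ===== CLAIM (what is proved, stated in full; the proofs are below) =====
def Claim_equal_build_use_code_lookup_py : Prop := ∀ (uses_records : List (List (String × String))), Dom_build_use_code_lookup_py uses_records → Spec_build_use_code_lookup_py uses_records (build_use_code_lookup_py uses_records)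

-- ===== LEMMAS AND PROOFS =====

-- A's loop body, on an already-extracted pair
def pvStep (d : PySem.Dict String (PySem.Set String)) (p : String × String) : PySem.Dict String (PySem.Set String) :=
  d.modify p.1 PySem.Set.empty (fun s => PySem.Set.add s p.2)

-- A's filtered loop over records is the plain loop over the filtered pair list
lemma foldl_records_eq_foldl_pairs (recs : List (List (String × String)))
    (d : PySem.Dict String (PySem.Set String)) :
    recs.foldl (fun d rec =>
      let app_num := (PySem.Dict.mk rec).getD "APPLICATION_NUMBER" ""
      let use_code := (PySem.Dict.mk rec).getD "USE_CODE" ""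
      if app_num == "" || use_code == "" then d
      else if PySem.Set.contains pvExcludeUseCodes use_code then d
      else d.modify app_num PySem.Set.empty (fun s => PySem.Set.add s use_code)) d
    = (pvPairs recs).foldl pvStep d := by
  induction recs generalizing d with
  | nil => rfl
  | cons r rs ih =>
    simp only [List.foldl_cons]
    rw [ih]
    by_cases h1 : (PySem.Dict.mk r).getD "APPLICATION_NUMBER" "" = ""
    · simp [pvPairs, h1]
    · by_cases h2 : (PySem.Dict.mk r).getD "USE_CODE" "" = ""
      · simp [pvPairs, h2]
      · by_cases h3 : (PySem.Dict.mk r).getD "USE_CODE" "" ∈ pvExcludeUseCodes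
        · simp [pvPairs, h3]
        · simp [pvPairs, h1, h2, h3, pvStep]

-- the value stored at key a after the loop: the filtered pair list's codes for a, folded by Set.add
lemma getD_foldl_pvStep (ps : List (String × String)) (d : PySem.Dict String (PySem.Set String)) (a : String) :
    (ps.foldl pvStep d).getD a PySem.Set.empty
    = ((ps.filter (fun p => p.1 == a)).map (fun p => p.2)).foldl PySem.Set.add (d.getD a PySem.Set.empty) := by
  induction ps generalizing d with
  | nil => rfl
  | cons p ps ih =>
    simp only [List.foldl_cons, List.filter_cons]
    by_cases h : p.1 = a
    · subst h
      rw [show pvStep d p = d.modify p.1 PySem.Set.empty (fun s => PySem.Set.add s p.2) from rfl,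
        ih, PySem.Dict.getD_modify_self]
      simp
    · rw [show pvStep d p = d.modify p.1 PySem.Set.empty (fun s => PySem.Set.add s p.2) from rfl,
        ih, PySem.Dict.getD_modify]
      rw [if_neg (fun e => h e.symm)]
      simp [h]

lemma keys_foldl_pvStep (ps : List (String × String)) :
    (ps.foldl pvStep PySem.Dict.empty).keys = PySem.Set.ofList (ps.map (fun p => p.1)) := by
  have h := PySem.Dict.keys_foldl_modify_key ps (fun p => p.1) PySem.Set.empty
      (fun d p => fun s => PySem.Set.add s p.2) PySem.Dict.empty
  simpa [pvStep, PySem.Dict.keys_empty, PySem.Set.update, PySem.Set.ofList_eq_foldl] using h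

lemma nodup_keys_foldl_pvStep (ps : List (String × String)) :
    (ps.foldl pvStep PySem.Dict.empty).keys.Nodup := by
  have h := PySem.Dict.nodup_keys_foldl_modify_key ps (fun p => p.1) PySem.Set.empty
      (fun d p => fun s => PySem.Set.add s p.2) PySem.Dict.empty (by simp)
  simpa [pvStep] using h

-- ===== VERDICT (by name: the statement is the Claim_ definition above) =====
theorem build_use_code_lookup_py_spec : Claim_equal_build_use_code_lookup_py := by
  intro recs _
  simp only [Spec_build_use_code_lookup_py, build_use_code_lookup_py, build_use_code_lookup_py_alt]
  rw [foldl_records_eq_foldl_pairs]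
  set ps := pvPairs recs with hps
  rw [PySem.Dict.items_eq_map_keys _ (nodup_keys_foldl_pvStep ps) PySem.Set.empty,
      keys_foldl_pvStep]
  simp only [List.map_map, PySem.List.dedup_eq_ofList]
  refine List.map_congr_left (fun a _ => ?_)
  simp only [Function.comp_apply, getD_foldl_pvStep, PySem.Dict.getD_empty,
    PySem.Set.ofList_eq_foldl]
  rfl
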